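-- pv_equiv track=rewrite | github.com/daniel-reich/turbo-robot | 82AvsFFQprj43XCDS_23.py | no_strangers
-- ===== SOURCE A (Python) =====
-- def no_strangers(txt):
--     txt = txt.lower()
--     txt = ''.join([x for x in txt if x.isalpha() or x in " '"])
--     txt = txt.split()
--     d = {}
--     friends = []
--     acquaintances = []
--     for x in txt:
--         if x in d:
--             d[x] += 1
--         else:
--             d[x] = 1
--         if d[x] == 5:
--             friends.append(x)
--             acquaintances.remove(x)
--         elif d[x] == 3:
--             acquaintances.append(x)
--     return [acquaintances, friends]
-- ===== SOURCE B (Python) =====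
-- def no_strangers(txt):
--     txt = txt.lower()
--     words = ''.join([x for x in txt if x.isalpha() or x in " '"]).split()
--     total = {}
--     for w in words:
--         total[w] = total.get(w, 0) + 1
--     seen = {}
--     acquaintances = []
--     friends = []
--     for w in words:
--         c = seen.get(w, 0) + 1
--         seen[w] = c
--         if c == 3 and total.get(w, 0) < 5:
--             acquaintances.append(w)
--         elif c == 5:
--             friends.append(w)
--     return [acquaintances, friends]
-- ===== Notes on version B (the rewrite author's own statement) =====
-- stated objective: alternative
-- what changed: B precomputes each word's total count in a first pass and then builds both lists append-only in a second pass (a word whose total is >= 5 is never added to acquaintances), replacing A's incremental threshold loop that appends at count 3 and later deletes the word again with list.remove when it reaches 5.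
import Mathlib
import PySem

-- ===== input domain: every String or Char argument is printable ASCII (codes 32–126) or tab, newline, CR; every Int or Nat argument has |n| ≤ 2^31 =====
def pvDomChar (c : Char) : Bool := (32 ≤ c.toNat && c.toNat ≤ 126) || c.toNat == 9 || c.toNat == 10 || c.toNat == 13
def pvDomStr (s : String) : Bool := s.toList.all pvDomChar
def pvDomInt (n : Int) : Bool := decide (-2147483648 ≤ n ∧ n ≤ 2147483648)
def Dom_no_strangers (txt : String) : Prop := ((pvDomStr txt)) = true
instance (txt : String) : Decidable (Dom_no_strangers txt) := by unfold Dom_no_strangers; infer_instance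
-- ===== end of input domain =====

-- B replaces A's threshold loop (append at count 3, list.remove at count 5) by a first pass
-- computing total counts and an append-only second pass; objective: alternative (no list.remove).

-- ===== PORT A =====
-- txt.lower(); keep alphabetic chars, space and apostrophe; .split()
def nsWordsA (txt : String) : List String :=
  PySem.Str.split₀
    (String.ofList ((PySem.Str.lower txt).toList.filter
      (fun c => PySem.Chars.isalpha c || (c == ' ' || c == '\''))))

-- one iteration of A's loop; state = (d, friends, acquaintances)
def nsStepA (st : PySem.Dict String Int × List String × List String) (x : String) :
    PySem.Dict String Int × List String × List String :=
  let d' : PySem.Dict String Int :=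
    match st.1.get? x with          -- if x in d: d[x] += 1 else d[x] = 1
    | some v => st.1.insert x (v + 1)
    | none => st.1.insert x 1
  -- d[x]: x was just inserted so get? is some; getD 0 is exact here
  let c : Int := (d'.get? x).getD 0
  if c = 5 then
    -- acquaintances.remove(x): x was appended when its count reached 3 and not removed since,
    -- so remove? is always some; the getD fallback is unreachable
    (d', st.2.1 ++ [x], (PySem.List.remove? st.2.2 x).getD st.2.2)
  else if c = 3 then
    (d', st.2.1, st.2.2 ++ [x])
  else
    (d', st.2.1, st.2.2)

def no_strangers (txt : String) : List (List String) :=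
  let st := (nsWordsA txt).foldl nsStepA (PySem.Dict.empty, [], [])
  [st.2.2, st.2.1]

-- ===== PORT B =====
def nsWordsB (txt : String) : List String :=
  PySem.Str.split₀
    (String.ofList ((PySem.Str.lower txt).toList.filter
      (fun c => PySem.Chars.isalpha c || (c == ' ' || c == '\''))))

-- one iteration of B's second loop; state = (seen, acquaintances, friends)
def nsStepB (total : PySem.Dict String Int)
    (st : PySem.Dict String Int × List String × List String) (w : String) :
    PySem.Dict String Int × List String × List String :=
  let c : Int := st.1.getD w 0 + 1
  let seen := st.1.insert w c
  if c = 3 ∧ total.getD w 0 < 5 then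
    (seen, st.2.1 ++ [w], st.2.2)
  else if c = 5 then
    (seen, st.2.1, st.2.2 ++ [w])
  else
    (seen, st.2.1, st.2.2)

def no_strangers_alt (txt : String) : List (List String) :=
  let words := nsWordsB txt
  let total := words.foldl (fun d w => d.insert w (d.getD w 0 + 1)) PySem.Dict.empty
  let st := words.foldl (nsStepB total) (PySem.Dict.empty, [], [])
  [st.2.1, st.2.2]

-- ===== PRECONDITION & SPEC =====
def Spec_no_strangers (txt : String) (out : List (List String)) : Prop := out = no_strangers_alt txt
instance (txt : String) (out : List (List String)) : Decidable (Spec_no_strangers txt out) := by unfold Spec_no_strangers; infer_instance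

-- ===== CLAIM (what is proved, stated in full; the proofs are below) =====
def Claim_equal_no_strangers : Prop := ∀ (txt : String), Dom_no_strangers txt → Spec_no_strangers txt (no_strangers txt)

-- ===== LEMMAS AND PROOFS =====

theorem nsWords_eq (txt : String) : nsWordsA txt = nsWordsB txt := rfl

-- the joint loop invariant, by induction on the remaining words r with processed prefix p
theorem ns_inv (total : PySem.Dict String Int) :
    ∀ (r p : List String)
      (_ : ∀ x, total.getD x 0 = ((p ++ r).count x : Int))
      (d seen : PySem.Dict String Int) (frA acqA acqB frB : List String)
      (_ : ∀ x, d.get? x = if p.count x = 0 then none else some (p.count x : Int))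
      (_ : ∀ x, seen.getD x 0 = (p.count x : Int))
      (_ : frA = frB)
      (_ : acqB.Sublist acqA)
      (_ : acqA.Nodup)
      (_ : ∀ x, x ∈ acqA ↔ (3 ≤ p.count x ∧ p.count x ≤ 4))
      (_ : ∀ x, x ∈ acqB ↔ (3 ≤ p.count x ∧ total.getD x 0 < 5)),
      (r.foldl nsStepA (d, frA, acqA)).2.2 = (r.foldl (nsStepB total) (seen, acqB, frB)).2.1 ∧
      (r.foldl nsStepA (d, frA, acqA)).2.1 = (r.foldl (nsStepB total) (seen, acqB, frB)).2.2 := by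
  intro r
  induction r with
  | nil =>
    intro p htot d seen frA acqA acqB frB hd hseen hfr hsub hnd hA hB
    simp only [List.foldl_nil]
    refine ⟨?_, hfr⟩
    have hsubset : acqA ⊆ acqB := by
      intro x hx
      have h1 := (hA x).1 hx
      refine (hB x).2 ⟨h1.1, ?_⟩
      have h2 := htot x
      simp only [List.append_nil] at h2
      rw [h2]
      exact_mod_cast (by omega : (p.count x : Int) < 5)
    have hlen : acqA.length ≤ acqB.length := (hnd.subperm hsubset).length_le
    exact (hsub.eq_of_length (le_antisymm hsub.length_le hlen)).symm
  | cons w r' ih =>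
    intro p htot d seen frA acqA acqB frB hd hseen hfr hsub hnd hA hB
    simp only [List.foldl_cons]
    have hins : (match d.get? w with
        | some v => d.insert w (v + 1) | none => d.insert w 1)
        = d.insert w ((p.count w : Int) + 1) := by
      rw [hd w]; by_cases h0 : p.count w = 0 <;> simp [h0]
    have hgd : ((d.insert w ((p.count w : Int) + 1)).get? w).getD 0 = (p.count w : Int) + 1 := by
      simp
    have hsA : nsStepA (d, frA, acqA) w =
        if (p.count w : Int) + 1 = 5 then
          (d.insert w ((p.count w : Int) + 1), frA ++ [w], (PySem.List.remove? acqA w).getD acqA)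
        else if (p.count w : Int) + 1 = 3 then
          (d.insert w ((p.count w : Int) + 1), frA, acqA ++ [w])
        else (d.insert w ((p.count w : Int) + 1), frA, acqA) := by
      simp only [nsStepA, hins, hgd]
    have hsB : nsStepB total (seen, acqB, frB) w =
        if (p.count w : Int) + 1 = 3 ∧ total.getD w 0 < 5 then
          (seen.insert w ((p.count w : Int) + 1), acqB ++ [w], frB)
        else if (p.count w : Int) + 1 = 5 then
          (seen.insert w ((p.count w : Int) + 1), acqB, frB ++ [w])
        else (seen.insert w ((p.count w : Int) + 1), acqB, frB) := by
      simp only [nsStepB, hseen w]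
    rw [hsA, hsB]
    have hcount : ∀ x, (p ++ [w]).count x = p.count x + if w = x then 1 else 0 := by
      intro x; simp [List.count_append, List.count_cons, beq_iff_eq]
    have hcountw : (p ++ [w]).count w = p.count w + 1 := by simp [hcount]
    have hd' : ∀ x, (d.insert w ((p.count w : Int) + 1)).get? x =
        if (p ++ [w]).count x = 0 then none else some ((p ++ [w]).count x : Int) := by
      intro x
      rw [PySem.Dict.get?_insert]
      by_cases hx : x = w
      · subst hx; rw [if_pos rfl, hcountw, if_neg (by omega)]; push_cast; ring_nf
      · have hcx : List.count x (p ++ [w]) = List.count x p := by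
          simp [hcount x, show ¬ w = x from fun h => hx h.symm]
        rw [if_neg hx, hcx]; exact hd x
    have hseen' : ∀ x, (seen.insert w ((p.count w : Int) + 1)).getD x 0 =
        ((p ++ [w]).count x : Int) := by
      intro x
      rw [PySem.Dict.getD_insert]
      by_cases hx : x = w
      · subst hx; rw [if_pos rfl, hcountw]; push_cast; ring_nf
      · have hcx : List.count x (p ++ [w]) = List.count x p := by
          simp [hcount x, show ¬ w = x from fun h => hx h.symm]
        rw [if_neg hx, hcx]; exact hseen x
    have htot' : ∀ x, total.getD x 0 = (((p ++ [w]) ++ r').count x : Int) := by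
      intro x; rw [List.append_assoc]; exact htot x
    have htotw : total.getD w 0 = (p.count w : Int) + 1 + (r'.count w : Int) := by
      have h := htot w
      rw [h]; simp [List.count_append]; ring
    by_cases h4 : p.count w = 4
    · -- fifth occurrence: A removes w from acquaintances and appends to friends; B appends to friends
      have hc5 : (p.count w : Int) + 1 = 5 := by rw [h4]; norm_num
      have hnot3 : ¬((p.count w : Int) + 1 = 3 ∧ total.getD w 0 < 5) := by
        rintro ⟨h, -⟩; rw [h4] at h; norm_num at h
      rw [if_pos hc5, if_neg hnot3, if_pos hc5]
      have hw : w ∈ acqA := (hA w).2 (by omega)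
      have hrem : (PySem.List.remove? acqA w).getD acqA = acqA.erase w := by
        rw [PySem.List.remove?_eq_some_erase acqA w hw]; rfl
      rw [hrem]
      have htw5 : ¬ total.getD w 0 < 5 := by rw [htotw, h4]; push_cast; omega
      have hwB : w ∉ acqB := fun hm => htw5 ((hB w).1 hm).2
      refine ih (p ++ [w]) htot' _ _ _ _ _ _ hd' hseen' (by rw [hfr]) ?_ (hnd.erase w) ?_ ?_
      · have h := hsub.erase w
        rwa [List.erase_of_not_mem hwB] at h
      · intro x
        by_cases hx : x = w
        · subst hx
          have hno : ¬ (3 ≤ List.count x (p ++ [x]) ∧ List.count x (p ++ [x]) ≤ 4) := by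
            rw [hcountw]; omega
          rw [hnd.mem_erase_iff]
          exact ⟨fun h => absurd rfl h.1, fun h => absurd h hno⟩
        · have hcx : List.count x (p ++ [w]) = List.count x p := by
            simp [hcount x, show ¬ w = x from fun h => hx h.symm]
          rw [hnd.mem_erase_iff, hcx, hA x]
          simp [hx]
      · intro x
        by_cases hx : x = w
        · subst hx
          simp [hwB, htw5]
        · have hcx : List.count x (p ++ [w]) = List.count x p := by
            simp [hcount x, show ¬ w = x from fun h => hx h.symm]
          rw [hcx]; exact hB x
    · by_cases h2 : p.count w = 2
      · -- third occurrence: A appends to acquaintances; B appends iff the total stays below 5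
        have hc3 : (p.count w : Int) + 1 = 3 := by rw [h2]; norm_num
        have hnc5 : ¬ (p.count w : Int) + 1 = 5 := by rw [h2]; norm_num
        have hwA : w ∉ acqA := fun hm => by have := (hA w).1 hm; omega
        have hnd' : (acqA ++ [w]).Nodup := by
          rw [List.nodup_append]
          refine ⟨hnd, List.nodup_singleton w, ?_⟩
          intro a ha b hb
          rw [List.mem_singleton] at hb
          subst hb
          exact fun h => hwA (h ▸ ha)
        rw [if_neg hnc5, if_pos hc3]
        by_cases htw : total.getD w 0 < 5
        · rw [if_pos ⟨hc3, htw⟩]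
          refine ih (p ++ [w]) htot' _ _ _ _ _ _ hd' hseen' hfr
            (hsub.append (List.Sublist.refl [w])) hnd' ?_ ?_
          · intro x
            by_cases hx : x = w
            · subst hx
              rw [hcountw, h2]
              norm_num [List.mem_append]
            · have hcx : List.count x (p ++ [w]) = List.count x p := by
                simp [hcount x, show ¬ w = x from fun h => hx h.symm]
              rw [hcx]
              simp only [List.mem_append, List.mem_singleton, hx, or_false]
              exact hA x
          · intro x
            by_cases hx : x = w
            · subst hx
              rw [hcountw, h2]
              norm_num [List.mem_append, htw]
            · have hcx : List.count x (p ++ [w]) = List.count x p := by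
                simp [hcount x, show ¬ w = x from fun h => hx h.symm]
              rw [hcx]
              simp only [List.mem_append, List.mem_singleton, hx, or_false]
              exact hB x
        · rw [if_neg (fun h => htw h.2), if_neg hnc5]
          refine ih (p ++ [w]) htot' _ _ _ _ _ _ hd' hseen' hfr
            (hsub.trans (List.sublist_append_left _ _)) hnd' ?_ ?_
          · intro x
            by_cases hx : x = w
            · subst hx
              rw [hcountw, h2]
              norm_num [List.mem_append]
            · have hcx : List.count x (p ++ [w]) = List.count x p := by
                simp [hcount x, show ¬ w = x from fun h => hx h.symm]
              rw [hcx]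
              simp only [List.mem_append, List.mem_singleton, hx, or_false]
              exact hA x
          · intro x
            by_cases hx : x = w
            · subst hx
              have hwB : x ∉ acqB := fun hm => htw ((hB x).1 hm).2
              simp [hwB, htw]
            · have hcx : List.count x (p ++ [w]) = List.count x p := by
                simp [hcount x, show ¬ w = x from fun h => hx h.symm]
              rw [hcx]; exact hB x
      · -- any other occurrence count: neither program touches its lists
        have hnc5 : ¬ (p.count w : Int) + 1 = 5 := by
          intro h; apply h4; exact_mod_cast (by omega : (p.count w : Int) = 4)
        have hnc3 : ¬ (p.count w : Int) + 1 = 3 := by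
          intro h; apply h2; exact_mod_cast (by omega : (p.count w : Int) = 2)
        rw [if_neg hnc5, if_neg hnc3, if_neg (fun h => hnc3 h.1), if_neg hnc5]
        refine ih (p ++ [w]) htot' _ _ _ _ _ _ hd' hseen' hfr hsub hnd ?_ ?_
        · intro x
          by_cases hx : x = w
          · subst hx
            rw [hA x, hcountw]
            omega
          · have hcx : List.count x (p ++ [w]) = List.count x p := by
              simp [hcount x, show ¬ w = x from fun h => hx h.symm]
            rw [hcx]; exact hA x
        · intro x
          by_cases hx : x = w
          · subst hx
            rw [hB x, hcountw]
            omega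
          · have hcx : List.count x (p ++ [w]) = List.count x p := by
              simp [hcount x, show ¬ w = x from fun h => hx h.symm]
            rw [hcx]; exact hB x

theorem no_strangers_spec' (txt : String) : no_strangers txt = no_strangers_alt txt := by
  have htot : ∀ x,
      ((nsWordsB txt).foldl (fun d w => d.insert w (d.getD w 0 + 1)) PySem.Dict.empty).getD x 0
        = (([] ++ nsWordsB txt).count x : Int) := by
    intro x
    rw [PySem.Dict.getD_foldl_insert_add_one, List.nil_append, PySem.Dict.getD_empty]
    omega
  obtain ⟨h1, h2⟩ := ns_inv
    ((nsWordsB txt).foldl (fun d w => d.insert w (d.getD w 0 + 1)) PySem.Dict.empty)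
    (nsWordsB txt) [] htot PySem.Dict.empty PySem.Dict.empty [] [] [] []
    (by intro x; rw [List.count_nil, if_pos rfl, PySem.Dict.get?_empty])
    (by intro x; rw [List.count_nil, PySem.Dict.getD_empty]; rfl)
    rfl (List.Sublist.refl []) List.nodup_nil
    (by intro x; simp)
    (by intro x; simp)
  simp only [no_strangers, no_strangers_alt, nsWords_eq]
  rw [h1, h2]

-- ===== VERDICT (by name: the statement is the Claim_ definition above) =====
theorem no_strangers_spec : Claim_equal_no_strangers := by
  intro txt _
  exact no_strangers_spec' txt
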